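-- pv_equiv track=rewrite | github.com/hamatiq/cs4050-programs | multiplicative_group.py | addative_group_table
-- ===== SOURCE A (Python) =====
-- def addative_group_table(n):
--     table = []
--     group = [e for e in range(n)]
--     for a in group:
--         x = [e+a for e in group]
--         table.append(x)
--
--     for a in range(len(table)):
--         table[a] = [e%n for e in table[a]]
--     return table
-- ===== SOURCE B (Python) =====
-- def addative_group_table(n):
--     r = list(range(n))
--     return [r[a:] + r[:a] for a in r]
-- ===== Notes on version B (the rewrite author's own statement) =====
-- stated objective: idiomatic
-- what changed: B builds the base row once and forms each row as a cyclic rotation of it by list slicing, eliminating A's add-then-modulo arithmetic and its second normalisation pass.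
import Mathlib
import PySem

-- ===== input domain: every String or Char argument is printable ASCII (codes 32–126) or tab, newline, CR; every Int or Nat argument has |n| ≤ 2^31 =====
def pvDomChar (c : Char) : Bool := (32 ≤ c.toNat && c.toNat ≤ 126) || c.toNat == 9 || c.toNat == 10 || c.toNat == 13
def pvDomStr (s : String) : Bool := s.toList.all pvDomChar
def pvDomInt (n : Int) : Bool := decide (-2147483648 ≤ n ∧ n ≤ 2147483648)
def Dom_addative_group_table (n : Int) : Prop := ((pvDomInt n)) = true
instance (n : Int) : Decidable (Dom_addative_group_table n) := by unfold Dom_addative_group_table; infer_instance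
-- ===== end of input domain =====

-- B replaces A's add-then-modulo double pass by slicing rotations of one base row (idiomatic; same value everywhere).

-- ===== PORT A =====
-- first loop appends row [e+a for e in group]; second loop rewrites each row in place to [e%n for e in row]
def addative_group_table (n : Int) : List (List Int) :=
  let group := PySem.List.pyRange 0 n 1
  let table := group.foldl (fun t a => t ++ [group.map (fun e => e + a)]) []
  table.map (fun row => row.map (fun e => PySem.Int.mod e n))

-- ===== PORT B =====
def addative_group_table_alt (n : Int) : List (List Int) :=
  let r := PySem.List.pyRange 0 n 1
  r.map (fun a => PySem.List.slice r (some a) none ++ PySem.List.slice r none (some a))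

-- ===== PRECONDITION & SPEC =====
def Spec_addative_group_table (n : Int) (out : List (List Int)) : Prop := out = addative_group_table_alt n
instance (n : Int) (out : List (List Int)) : Decidable (Spec_addative_group_table n out) := by unfold Spec_addative_group_table; infer_instance

-- ===== CLAIM (what is proved, stated in full; the proofs are below) =====
def Claim_equal_addative_group_table : Prop := ∀ (n : Int), Dom_addative_group_table n → Spec_addative_group_table n (addative_group_table n)

-- ===== LEMMAS AND PROOFS =====

-- the append-fold of A's first loop is a map
theorem foldl_append_singleton {α β : Type} (f : α → β) (l : List α) (init : List β) :
    l.foldl (fun t a => t ++ [f a]) init = init ++ l.map f := by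
  induction l generalizing init with
  | nil => simp
  | cons x xs ih => simp [List.foldl_cons, ih]

-- rotation of range N by j equals pointwise (k+j) % N
theorem range_rot (N j : Nat) (hj : j ≤ N) :
    (List.range N).map (fun k => (k + j) % N) = (List.range N).drop j ++ (List.range N).take j := by
  apply List.ext_getElem
  · simp; omega
  · intro i h1 h2
    simp only [List.getElem_map, List.getElem_range]
    rw [List.getElem_append]
    split_ifs with h
    · rw [List.getElem_drop, List.getElem_range]
      have : i + j < N := by simp at h; omega
      rw [Nat.mod_eq_of_lt this]; omega
    · rw [List.getElem_take, List.getElem_range]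
      simp only [List.length_drop, List.length_range] at h
      simp only [List.length_map, List.length_range] at h1
      have hge : N ≤ i + j := by omega
      have hlt : i + j - N < N := by omega
      rw [Nat.mod_eq_sub_mod hge, Nat.mod_eq_of_lt hlt]
      have hd : (List.drop j (List.range N)).length = N - j := by simp
      omega

-- ===== VERDICT (by name: the statement is the Claim_ definition above) =====
theorem addative_group_table_spec : Claim_equal_addative_group_table := by
  intro n _
  unfold Spec_addative_group_table addative_group_table addative_group_table_alt
  simp only []
  rw [foldl_append_singleton, List.nil_append, List.map_map]
  apply List.map_congr_left
  intro a ha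
  rw [PySem.List.mem_pyRange_one] at ha
  obtain ⟨ha0, han⟩ := ha
  have hn : 0 < n := lt_of_le_of_lt ha0 han
  set N := n.toNat with hN
  have hnN : n = (N : Int) := by omega
  obtain ⟨j, rfl⟩ : ∃ j : Nat, a = (j : Int) := ⟨a.toNat, by omega⟩
  have hjN : j ≤ N := by omega
  simp only [Function.comp_apply]
  rw [PySem.List.slice_from _ ha0, PySem.List.slice_to _ ha0]
  have hr : PySem.List.pyRange 0 n 1 = (List.range N).map Int.ofNat := by
    rw [PySem.List.pyRange_one]
    have h0 : (n - 0).toNat = N := by omega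
    rw [h0]
    exact List.map_congr_left (fun k _ => by simp only [Int.ofNat_eq_natCast]; omega)
  rw [hr, Int.toNat_natCast, ← List.map_drop, ← List.map_take, ← List.map_append,
     ← range_rot N j hjN, List.map_map, List.map_map, List.map_map]
  apply List.map_congr_left
  intro k _
  simp only [Function.comp_apply]
  rw [PySem.Int.mod_eq_emod_of_pos hn, hnN]
  simp only [Int.ofNat_eq_natCast]
  push_cast
  ring
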